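-- pv_equiv track=rewrite | github.com/jarronb-iit/itmd513-python | hw-03/Bailey_hw3.py | sumOfDoubleEvenPlace
-- ===== SOURCE A (Python) =====
-- def getDigit(number):
--     if len(number) >= 2:
--         sum = 0
--         for num in number:
--             num = int(num)
--             sum += num
--         return sum
--     else:
--         number = int(number)
--         return number
--
-- def sumOfDoubleEvenPlace(card_number):
--     numbersSumArray = []
--     numbers = []
--     sumOfNumbers = 0
--
--     # For every other index starting at 0
--     for idx, char in enumerate(card_number):
--         if idx % 2 == 0:
--             char = int(char)
--             numbers.append(char)
--         else:
--             continue
--     # Loop through each number in the array and double it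
--     for num in numbers:
--         numDoubled = num * 2
--
--         # Convert the product in to a string
--         numDoubledString = str(numDoubled)
--
--         # return single digit or sum of multiple digits
--         numDoubled = getDigit(numDoubledString)
--
--         numbersSumArray.append(numDoubled)
--     for num in numbersSumArray:
--         sumOfNumbers += num
--     return sumOfNumbers
-- ===== SOURCE B (Python) =====
-- def sumOfDoubleEvenPlace(card_number):
--     total = 0
--     for idx, char in enumerate(card_number):
--         if idx % 2 == 0:
--             d2 = int(char) * 2
--             total += d2 - 9 if d2 >= 10 else d2
--     return total
-- ===== Notes on version B (the rewrite author's own statement) =====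
-- stated objective: simpler
-- what changed: One accumulating pass over enumerate replaces A's three sequential passes (build even-index digit list, map each doubled digit through a string-based digit-sum helper into a second list, then sum that list); the digit-sum of a doubled digit is computed arithmetically as d2-9 when d2>=10 instead of via str()/getDigit.
import Mathlib
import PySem

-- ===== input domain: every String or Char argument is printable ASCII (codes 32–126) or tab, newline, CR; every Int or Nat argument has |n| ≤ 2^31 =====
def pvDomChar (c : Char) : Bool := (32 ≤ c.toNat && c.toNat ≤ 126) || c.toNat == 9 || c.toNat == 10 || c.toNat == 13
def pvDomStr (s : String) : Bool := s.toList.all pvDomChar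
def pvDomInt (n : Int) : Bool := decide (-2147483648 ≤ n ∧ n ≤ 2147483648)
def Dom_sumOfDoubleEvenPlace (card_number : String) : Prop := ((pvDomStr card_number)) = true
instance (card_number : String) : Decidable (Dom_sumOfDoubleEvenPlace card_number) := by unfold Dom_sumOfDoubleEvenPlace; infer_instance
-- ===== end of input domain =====

-- B replaces A's three sequential passes (list of even-index digits, list of string-digit-summed
-- doubles, then a summing pass) by one accumulating pass with an arithmetic reduction d2-9.


-- ===== PORT A =====
-- getDigit: sums the digits of the string if it has ≥ 2 chars, else int(number).
-- int(…) is ported by PySem.Int.ofStr?/ofChars?; the .getD 0 default is unreachable under Pre_.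
def pvGetDigit (number : String) : Int :=
  if 2 ≤ number.toList.length then
    number.toList.foldl (fun sum c => sum + (PySem.Int.ofChars? [c]).getD 0) 0
  else
    (PySem.Int.ofStr? number).getD 0

def sumOfDoubleEvenPlace (card_number : String) : Int :=
  let numbers := (PySem.List.enumerate card_number.toList 0).foldl
    (fun numbers p =>
      if PySem.Int.mod p.1 2 == 0 then numbers ++ [(PySem.Int.ofChars? [p.2]).getD 0]
      else numbers) []
  let numbersSumArray := numbers.foldl
    (fun arr num => arr ++ [pvGetDigit (PySem.Int.toStr (num * 2))]) []
  numbersSumArray.foldl (fun sumOfNumbers num => sumOfNumbers + num) 0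

-- ===== PORT B =====
def sumOfDoubleEvenPlace_alt (card_number : String) : Int :=
  (PySem.List.enumerate card_number.toList 0).foldl
    (fun total p =>
      if PySem.Int.mod p.1 2 == 0 then
        let d2 := (PySem.Int.ofChars? [p.2]).getD 0 * 2
        total + (if 10 ≤ d2 then d2 - 9 else d2)
      else total) 0

-- ===== PRECONDITION & SPEC =====
-- Pre_ excludes exactly the inputs where int(char) raises ValueError in both programs:
-- some character at an even index is not a decimal digit.
def Pre_sumOfDoubleEvenPlace (card_number : String) : Prop :=
  ∀ p ∈ PySem.List.enumerate card_number.toList 0, PySem.Int.mod p.1 2 = 0 → p.2.isDigit = true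
instance (card_number : String) : Decidable (Pre_sumOfDoubleEvenPlace card_number) := by
  unfold Pre_sumOfDoubleEvenPlace; infer_instance

def pvWitness_sumOfDoubleEvenPlace : String := "4388576018402626"

def Spec_sumOfDoubleEvenPlace (card_number : String) (out : Int) : Prop := out = sumOfDoubleEvenPlace_alt card_number
instance (card_number : String) (out : Int) : Decidable (Spec_sumOfDoubleEvenPlace card_number out) := by unfold Spec_sumOfDoubleEvenPlace; infer_instance

-- ===== CLAIM (what is proved, stated in full; the proofs are below) =====
def Claim_equal_sumOfDoubleEvenPlace : Prop := ∀ (card_number : String), Dom_sumOfDoubleEvenPlace card_number → Pre_sumOfDoubleEvenPlace card_number → Spec_sumOfDoubleEvenPlace card_number (sumOfDoubleEvenPlace card_number)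

-- ===== LEMMAS AND PROOFS =====
-- int(c) on a single decimal digit character.
lemma ofChars?_digit (c : Char) (h : c.isDigit = true) :
    PySem.Int.ofChars? [c] = some ((c.toNat : Int) - 48) := by
  have hb : 48 ≤ c.toNat ∧ c.toNat ≤ 57 := by
    simp [Char.isDigit] at h; exact ⟨h.1, h.2⟩
  simp only [Char.toNat] at hb
  obtain ⟨h1, h2⟩ := hb
  interval_cases hv : c.val.toNat <;>
  · have hc : c = Char.ofNat c.val.toNat := by
      apply Char.ext; rw [hv]; apply UInt32.toNat_inj.mp; rw [hv]; decide
    rw [hv] at hc; subst hc; decide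

-- getDigit(str(2*d)) for a digit value d is the arithmetic reduction.
lemma getDigit_double (d : Int) (h0 : 0 ≤ d) (h9 : d ≤ 9) :
    pvGetDigit (PySem.Int.toStr (d * 2)) = if 10 ≤ d * 2 then d * 2 - 9 else d * 2 := by
  interval_cases d <;> decide

-- B's fold with a guarded add is the sum over the filtered list.
lemma foldl_add_if {α : Type} (l : List α) (p : α → Bool) (f : α → Int) (t : Int) :
    l.foldl (fun t x => if p x then t + f x else t) t = t + ((l.filter p).map f).sum := by
  induction l generalizing t with
  | nil => simp
  | cons a l ih =>
    by_cases h : p a <;> simp [List.foldl_cons, h, ih, add_assoc]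

-- ===== VERDICT (by name: the statement is the Claim_ definition above) =====
theorem sumOfDoubleEvenPlace_spec : Claim_equal_sumOfDoubleEvenPlace := by
  intro s _ hpre
  unfold Spec_sumOfDoubleEvenPlace sumOfDoubleEvenPlace sumOfDoubleEvenPlace_alt
  simp only [PySem.List.foldl_append_if, PySem.List.foldl_append_singleton_eq_map,
    List.nil_append]
  rw [show (fun (sumOfNumbers num : Int) => sumOfNumbers + num) = (fun a x => a + id x) by rfl,
    PySem.List.foldl_add]
  rw [show (fun (total : Int) (p : Int × Char) =>
        if PySem.Int.mod p.1 2 == 0 then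
          total + (if 10 ≤ (PySem.Int.ofChars? [p.2]).getD 0 * 2 then
            (PySem.Int.ofChars? [p.2]).getD 0 * 2 - 9 else (PySem.Int.ofChars? [p.2]).getD 0 * 2)
        else total)
      = (fun t p => if (PySem.Int.mod p.1 2 == 0 : Bool) then
          t + (fun q : Int × Char => (if 10 ≤ (PySem.Int.ofChars? [q.2]).getD 0 * 2 then
            (PySem.Int.ofChars? [q.2]).getD 0 * 2 - 9 else (PySem.Int.ofChars? [q.2]).getD 0 * 2)) p
          else t) by rfl,
    foldl_add_if]
  simp only [List.map_map, zero_add]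
  congr 1
  apply List.map_congr_left
  intro p hp
  have hmem := List.mem_of_mem_filter hp
  have hguard := List.of_mem_filter hp
  have hdig : p.2.isDigit = true := by
    apply hpre p hmem
    simpa using hguard
  have hc := ofChars?_digit p.2 hdig
  have hb : 48 ≤ p.2.toNat ∧ p.2.toNat ≤ 57 := by
    simp [Char.isDigit] at hdig; exact ⟨hdig.1, hdig.2⟩
  simp only [Function.comp, hc, Option.getD_some, id]
  exact getDigit_double _ (by omega) (by omega)
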